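-- pv_equiv track=rewrite | github.com/MinChoi0129/Algorithm_Problems | asdasdas.py | makeNewKey
-- ===== SOURCE A (Python) =====
-- def makeNewKey(key, u, d, l, r):
--     new_key = []
--     for _ in range(0, u + len(key) + d):
--             new_key.append([1 for i in range(0, l + len(key) + r)])
--
--     for i in range(0, len(key)):
--         for j in range(0, len(key)):
--             new_key[i+u][j+l] = (key[i][j]+1)%2
--     return new_key
-- ===== SOURCE B (Python) =====
-- def makeNewKey(key, u, d, l, r):
--     n = len(key)
--     out = []
--     for i in range(u + n + d):
--         if i < u or i >= u + n:
--             out.append([1] * (l + n + r))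
--         else:
--             out.append([1] * l + [(key[i - u][j] + 1) % 2 for j in range(n)] + [1] * r)
--     return out
-- ===== Notes on version B (the rewrite author's own statement) =====
-- stated objective: simpler
-- what changed: B builds the padded grid row by row in one pass (all-1s rows outside the key band, l ones + inverted key row + r ones inside) instead of allocating an all-1s grid and then overwriting the center with a nested index loop.
-- outside the precondition, e.g. on makeNewKey([[1]], -1, 2, 0, 0): A returns [[1], [0]], B returns [[1], [1]]
import Mathlib
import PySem

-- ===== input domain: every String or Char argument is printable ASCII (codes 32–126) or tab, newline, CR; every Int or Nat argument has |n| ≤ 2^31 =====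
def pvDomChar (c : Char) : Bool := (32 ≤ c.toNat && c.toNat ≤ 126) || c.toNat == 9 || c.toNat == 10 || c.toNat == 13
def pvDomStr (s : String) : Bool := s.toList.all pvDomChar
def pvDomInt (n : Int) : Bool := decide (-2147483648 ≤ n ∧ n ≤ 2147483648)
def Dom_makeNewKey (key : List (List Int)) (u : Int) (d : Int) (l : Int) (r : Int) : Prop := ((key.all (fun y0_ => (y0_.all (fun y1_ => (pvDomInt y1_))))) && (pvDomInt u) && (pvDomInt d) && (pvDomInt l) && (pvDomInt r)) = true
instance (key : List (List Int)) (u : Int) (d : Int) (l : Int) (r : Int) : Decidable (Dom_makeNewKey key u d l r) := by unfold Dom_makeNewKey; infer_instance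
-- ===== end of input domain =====

-- B builds each output row directly in one pass instead of A's fill-with-1s-then-overwrite-the-center; equal return values on Pre_.

-- ===== PORT A =====
def makeNewKey (key : List (List Int)) (u : Int) (d : Int) (l : Int) (r : Int) : List (List Int) :=
  let newKey : List (List Int) :=
    (PySem.List.pyRange 0 (u + key.length + d) 1).foldl
      (fun acc _ => acc ++ [(PySem.List.pyRange 0 (l + key.length + r) 1).map (fun _ => (1 : Int))]) []
  (PySem.List.pyRange 0 key.length 1).foldl
    (fun nk i =>
      (PySem.List.pyRange 0 key.length 1).foldl
        (fun nk j =>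
          PySem.List.pySetD nk (i + u)
            (PySem.List.pySetD (PySem.List.pyGetD nk (i + u) []) (j + l)
              (PySem.Int.mod (PySem.List.pyGetD (PySem.List.pyGetD key i []) j 0 + 1) 2)))
        nk)
    newKey

-- ===== PORT B =====
def makeNewKey_alt (key : List (List Int)) (u : Int) (d : Int) (l : Int) (r : Int) : List (List Int) :=
  (PySem.List.pyRange 0 (u + key.length + d) 1).map (fun i =>
    if i < u ∨ u + (key.length : Int) ≤ i then
      List.replicate (l + key.length + r).toNat (1 : Int)
    else
      List.replicate l.toNat (1 : Int)
        ++ (PySem.List.pyRange 0 key.length 1).map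
            (fun j => PySem.Int.mod (PySem.List.pyGetD (PySem.List.pyGetD key (i - u) []) j 0 + 1) 2)
        ++ List.replicate r.toNat (1 : Int))

-- ===== PRECONDITION & SPEC =====
-- Pre_ excludes inputs outside the function's natural domain of non-negative pad counts and square-or-wider keys:
-- there A either raises IndexError (ragged key, or negative d/r/l with a non-empty key) or writes through Python's
-- negative-index wraparound (negative u), an artefact no caller would specify; B raises on ragged keys too.
-- (key = [] stays inside Pre_ for arbitrary pads: no write happens and both return the same all-1s grid.)
def Pre_makeNewKey (key : List (List Int)) (u : Int) (d : Int) (l : Int) (r : Int) : Prop :=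
  key = [] ∨ (0 ≤ u ∧ 0 ≤ d ∧ 0 ≤ l ∧ 0 ≤ r ∧ ∀ row ∈ key, key.length ≤ row.length)
instance (key : List (List Int)) (u : Int) (d : Int) (l : Int) (r : Int) : Decidable (Pre_makeNewKey key u d l r) := by unfold Pre_makeNewKey; infer_instance

def pvWitness_makeNewKey : List (List Int) × Int × Int × Int × Int := ([[0, 1], [1, 0]], 1, 2, 1, 0)

def Spec_makeNewKey (key : List (List Int)) (u : Int) (d : Int) (l : Int) (r : Int) (out : List (List Int)) : Prop := out = makeNewKey_alt key u d l r
instance (key : List (List Int)) (u : Int) (d : Int) (l : Int) (r : Int) (out : List (List Int)) : Decidable (Spec_makeNewKey key u d l r out) := by unfold Spec_makeNewKey; infer_instance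

-- ===== CLAIM (what is proved, stated in full; the proofs are below) =====
def Claim_equal_makeNewKey : Prop := ∀ (key : List (List Int)) (u : Int) (d : Int) (l : Int) (r : Int), Dom_makeNewKey key u d l r → Pre_makeNewKey key u d l r → Spec_makeNewKey key u d l r (makeNewKey key u d l r)

-- ===== LEMMAS AND PROOFS =====

-- the inverted entry both programs write at row i, column lo+j
def vEnt (key : List (List Int)) (i j : ℕ) : Int :=
  PySem.Int.mod ((key.getD i []).getD j 0 + 1) 2

-- the band row both programs produce at key row i
def vRow (key : List (List Int)) (lo ro : ℕ) (i : ℕ) : List Int :=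
  List.replicate lo (1 : Int) ++ (List.range key.length).map (vEnt key i) ++ List.replicate ro (1 : Int)

-- A's first loop: the all-1s grid is a replicate of a replicate
lemma buildGrid (m : Int) (row : List Int) :
    (PySem.List.pyRange 0 m 1).foldl (fun acc _ => acc ++ [row]) ([] : List (List Int))
      = List.replicate m.toNat row := by
  rw [PySem.List.foldl_append_singleton_eq_map, PySem.List.pyRange_one]
  simp [Function.comp_def, List.map_const']

lemma constRow (c : Int) :
    (PySem.List.pyRange 0 c 1).map (fun _ => (1 : Int)) = List.replicate c.toNat (1 : Int) := by
  rw [PySem.List.pyRange_one]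
  simp [Function.comp_def, List.map_const']

-- a loop of writes at positions off, off+1, …, off+n-1 replaces the middle segment
lemma setLoop {α : Type} (dflt : α) (F : ℕ → α → α) (off : ℕ) :
    ∀ (n : ℕ) (xs : List α), off + n ≤ xs.length →
    (List.range n).foldl (fun acc j => acc.set (off + j) (F j (acc.getD (off + j) dflt))) xs
      = xs.take off ++ (List.range n).map (fun j => F j (xs.getD (off + j) dflt)) ++ xs.drop (off + n) := by
  intro n
  induction n with
  | zero => intro xs h; simp
  | succ n ih =>
    intro xs h
    have hlt : off + n < xs.length := by omega
    rw [List.range_succ, List.foldl_append, List.map_append, ih xs (by omega)]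
    simp only [List.foldl_cons, List.foldl_nil, List.map_cons, List.map_nil]
    have htake : (xs.take off).length = off := by simp; omega
    have hget : (xs.take off ++ ((List.range n).map fun j => F j (xs.getD (off + j) dflt)) ++ xs.drop (off + n)).getD (off + n) dflt
        = xs.getD (off + n) dflt := by
      rw [List.append_assoc, List.getD_eq_getElem?_getD,
        List.getElem?_append_right (by simp [htake]), htake, Nat.add_sub_cancel_left,
        List.getElem?_append_right (by simp), List.length_map, List.length_range, Nat.sub_self]
      simp [List.getElem?_drop, List.getD_eq_getElem?_getD]
    rw [hget, List.append_assoc, List.set_append_right _ _ (by simp [htake]), htake,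
      Nat.add_sub_cancel_left, List.set_append_right _ _ (by simp), List.length_map,
      List.length_range, Nat.sub_self, List.drop_eq_getElem_cons hlt, List.set_cons_zero]
    simp only [List.getD_eq_getElem?_getD, List.getElem?_eq_getElem hlt]
    simp only [List.append_assoc, List.cons_append, List.nil_append]
    congr 3

-- A's inner j-loop only rewrites row p: it commutes out to a single row update
lemma innerOut (p lo : ℕ) (v : ℕ → Int) :
    ∀ (m : ℕ) (g : List (List Int)), p < g.length →
    (List.range m).foldl (fun g j => g.set p ((g.getD p []).set (lo + j) (v j))) g
      = g.set p ((List.range m).foldl (fun row j => row.set (lo + j) (v j)) (g.getD p [])) := by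
  intro m
  induction m with
  | zero => intro g hp; rw [List.getD_eq_getElem?_getD, List.getElem?_eq_getElem hp]; simp
  | succ m ih =>
    intro g hp
    rw [List.range_succ, List.foldl_append, List.foldl_append, ih g hp]
    simp only [List.foldl_cons, List.foldl_nil]
    rw [List.set_set]
    congr 1
    rw [List.getD_eq_getElem?_getD, List.getElem?_set_self (by simp [hp])]
    simp

-- two folds agree when the step functions agree on all states of the invariant length
lemma foldl_congr_len {β : Type} (f1 f2 : List β → ℕ → List β) :
    ∀ (is : List ℕ) (g : List β),
    (∀ g' i, i ∈ is → g'.length = g.length → f1 g' i = f2 g' i) →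
    (∀ g' i, (f2 g' i).length = g'.length) →
    is.foldl f1 g = is.foldl f2 g := by
  intro is
  induction is with
  | nil => intro g _ _; rfl
  | cons i is ih =>
    intro g h hlen
    simp only [List.foldl_cons]
    rw [h g i (by simp) rfl]
    exact ih (f2 g i) (fun g' j hj hl => h g' j (by simp [hj]) (by rw [hl, hlen])) hlen


lemma setLoopConst {α : Type} (dflt : α) (v : ℕ → α) (off n : ℕ) (xs : List α) (h : off + n ≤ xs.length) :
    (List.range n).foldl (fun acc j => acc.set (off + j) (v j)) xs
      = xs.take off ++ (List.range n).map v ++ xs.drop (off + n) :=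
  setLoop dflt (fun j _ => v j) off n xs h

-- A's port, reduced to its canonical pad-band-pad form
lemma A_eq (key : List (List Int)) (a d' lo ro : ℕ) :
    makeNewKey key ↑a ↑d' ↑lo ↑ro
      = List.replicate a (List.replicate (lo + key.length + ro) (1 : Int))
        ++ (List.range key.length).map (vRow key lo ro)
        ++ List.replicate d' (List.replicate (lo + key.length + ro) (1 : Int)) := by
  simp only [makeNewKey]
  rw [show ((a : Int) + ↑key.length + ↑d') = ((a + key.length + d' : ℕ) : Int) by push_cast; ring,
      show ((lo : Int) + ↑key.length + ↑ro) = ((lo + key.length + ro : ℕ) : Int) by push_cast; ring]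
  rw [constRow, buildGrid]
  simp only [Int.toNat_natCast]
  rw [PySem.List.pyRange_one 0 (key.length : Int)]
  simp only [sub_zero, Int.toNat_natCast, zero_add, List.foldl_map]
  rw [show (fun (nk : List (List Int)) (i : ℕ) =>
        List.foldl
          (fun nk (j : ℕ) =>
            PySem.List.pySetD nk ((i : Int) + ↑a)
              (PySem.List.pySetD (PySem.List.pyGetD nk ((i : Int) + ↑a) []) ((j : Int) + ↑lo)
                (PySem.Int.mod (PySem.List.pyGetD (PySem.List.pyGetD key (i : Int) []) (j : Int) 0 + 1) 2)))
          nk (List.range key.length))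
      = (fun nk i =>
        List.foldl (fun nk j => nk.set (a + i) (((nk.getD (a + i) []).set (lo + j) (vEnt key i j)))) nk
          (List.range key.length)) from by
    funext nk i
    congr 1
    funext nk' j
    rw [show ((i : Int) + ↑a) = ((a + i : ℕ) : Int) by push_cast; ring,
        show ((j : Int) + ↑lo) = ((lo + j : ℕ) : Int) by push_cast; ring,
        PySem.List.pySetD_natCast, PySem.List.pySetD_natCast, PySem.List.pyGetD_natCast,
        PySem.List.pyGetD_natCast, PySem.List.pyGetD_natCast]
    rfl]
  rw [foldl_congr_len _
      (fun nk i => nk.set (a + i)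
        ((List.range key.length).foldl (fun row j => row.set (lo + j) (vEnt key i j)) (nk.getD (a + i) [])))
      (List.range key.length) _
      (fun g' i hi hlen => innerOut (a + i) lo (vEnt key i) key.length g'
        (by rw [hlen]; simp only [List.length_replicate]; simp only [List.mem_range] at hi; omega))
      (fun g' i => by simp)]
  rw [setLoop []
      (fun i row => (List.range key.length).foldl (fun row j => row.set (lo + j) (vEnt key i j)) row)
      a key.length _ (by simp)]
  rw [List.take_replicate, List.drop_replicate]
  congr 1
  congr 1
  · congr 1
    omega
  · refine List.map_congr_left (fun i hi => ?_)
    simp only [List.mem_range] at hi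
    rw [List.getD_eq_getElem?_getD, List.getElem?_replicate, if_pos (by omega)]
    simp only [Option.getD_some]
    rw [setLoopConst (0 : Int) (vEnt key i) lo key.length _ (by simp)]
    rw [List.take_replicate, List.drop_replicate]
    unfold vRow
    congr 2
    all_goals congr 1
    all_goals omega
  · congr 1
    omega

-- B's port, reduced to the same canonical form
lemma B_eq (key : List (List Int)) (a d' lo ro : ℕ) :
    makeNewKey_alt key ↑a ↑d' ↑lo ↑ro
      = List.replicate a (List.replicate (lo + key.length + ro) (1 : Int))
        ++ (List.range key.length).map (vRow key lo ro)
        ++ List.replicate d' (List.replicate (lo + key.length + ro) (1 : Int)) := by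
  simp only [makeNewKey_alt]
  rw [show ((a : Int) + ↑key.length + ↑d') = ((a + (key.length + d') : ℕ) : Int) by push_cast; ring]
  rw [PySem.List.pyRange_one 0 ((a + (key.length + d') : ℕ) : Int)]
  simp only [sub_zero, Int.toNat_natCast, List.map_map]
  rw [List.range_add, List.range_add]
  simp only [List.map_append, List.map_map, zero_add]
  rw [← List.append_assoc]
  congr 1
  congr 1
  · rw [List.map_congr_left (g := fun _ => List.replicate (lo + key.length + ro) (1 : Int))
      (fun x hx => by
        simp only [List.mem_range] at hx
        simp only [Function.comp_apply]
        rw [if_pos (Or.inl (by exact_mod_cast hx))]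
        congr 1)]
    simp [List.map_const']
  · refine List.map_congr_left (fun x hx => ?_)
    simp only [List.mem_range] at hx
    simp only [Function.comp_apply]
    rw [if_neg (by push_cast; omega)]
    rw [show ((↑(a + x) : Int) - ↑a) = ((x : ℕ) : Int) by push_cast; ring]
    rw [PySem.List.pyGetD_natCast, PySem.List.pyRange_one]
    simp only [sub_zero, Int.toNat_natCast, zero_add, List.map_map]
    show _ = vRow key lo ro x
    unfold vRow vEnt
    congr 2
    simp [Function.comp_def]
  · rw [List.map_congr_left (g := fun _ => List.replicate (lo + key.length + ro) (1 : Int))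
      (fun x hx => by
        simp only [Function.comp_apply]
        rw [if_pos (Or.inr (by push_cast; omega))]
        congr 1)]
    simp [List.map_const']

-- ===== VERDICT (by name: the statement is the Claim_ definition above) =====
theorem makeNewKey_spec : Claim_equal_makeNewKey := by
  intro key u d l r _ hpre
  show makeNewKey key u d l r = makeNewKey_alt key u d l r
  rcases hpre with hnil | ⟨hu, hd, hl, hr, hsq⟩
  · subst hnil
    simp only [makeNewKey, makeNewKey_alt, List.length_nil, Nat.cast_zero, add_zero]
    rw [show PySem.List.pyRange 0 0 1 = [] from by simp]
    simp only [List.foldl_nil]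
    rw [PySem.List.foldl_append_singleton_eq_map, PySem.List.pyRange_one, PySem.List.pyRange_one]
    simp [Function.comp_def, List.map_const']
    rw [List.map_congr_left (fun x _ => if_pos (Int.lt_or_le _ u))]
    simp [List.map_const']
  · obtain ⟨a, rfl⟩ := Int.eq_ofNat_of_zero_le hu
    obtain ⟨d', rfl⟩ := Int.eq_ofNat_of_zero_le hd
    obtain ⟨lo, rfl⟩ := Int.eq_ofNat_of_zero_le hl
    obtain ⟨ro, rfl⟩ := Int.eq_ofNat_of_zero_le hr
    rw [A_eq, B_eq]
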